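-- pv_equiv track=rewrite | github.com/byu-dnasc/frontend-spec | py/tabulate_models.py | latex_quotes
-- ===== SOURCE A (Python) =====
-- def latex_quotes(string):
--     modified_string = ''
--     quotes_count = 0
--
--     for char in string:
--         if char == '"':
--             if quotes_count % 2 == 0:
--                 modified_string += '``'
--             else:
--                 modified_string += "''"
--             quotes_count += 1
--         else:
--             modified_string += char
--
--     return modified_string
-- ===== SOURCE B (Python) =====
-- def latex_quotes(string):
--     parts = string.split('"')
--     out = []
--     for i, part in enumerate(parts[:-1]):
--         out.append(part)
--         out.append('``' if i % 2 == 0 else "''")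
--     out.append(parts[-1])
--     return ''.join(out)
-- ===== Notes on version B (the rewrite author's own statement) =====
-- stated objective: faster
-- what changed: Replaces the char-by-char loop with repeated string concatenation and a quote counter by one split on the quote character followed by a join that inserts alternating opening/closing LaTeX tokens by gap-index parity.
import Mathlib
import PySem

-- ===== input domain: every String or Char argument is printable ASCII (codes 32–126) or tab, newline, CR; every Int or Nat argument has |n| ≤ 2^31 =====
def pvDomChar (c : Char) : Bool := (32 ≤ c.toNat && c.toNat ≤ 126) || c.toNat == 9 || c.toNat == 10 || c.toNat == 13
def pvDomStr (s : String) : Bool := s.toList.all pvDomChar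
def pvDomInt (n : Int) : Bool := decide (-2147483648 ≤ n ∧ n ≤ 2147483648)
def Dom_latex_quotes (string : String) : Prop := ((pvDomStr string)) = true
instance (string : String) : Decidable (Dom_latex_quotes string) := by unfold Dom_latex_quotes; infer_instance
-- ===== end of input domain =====

-- B splits the string on '"' once and joins the parts with alternating ``/'' tokens; same value, no per-char counter loop.

-- ===== PORT A =====
-- state: (modified_string, quotes_count), exactly A's loop
def latexQuotesStep (st : List Char × Nat) (c : Char) : List Char × Nat :=
  if c = '"' then
    (st.1 ++ (if st.2 % 2 = 0 then ['`', '`'] else ['\'', '\'']), st.2 + 1)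
  else
    (st.1 ++ [c], st.2)

def latex_quotes (string : String) : String :=
  String.mk (string.toList.foldl latexQuotesStep ([], 0)).1

-- ===== PORT B =====
-- hand-written port of str.split('"') over List Char (exact: '"' is a single char separator)
def splitQ : List Char → List (List Char)
  | [] => [[]]
  | c :: l =>
    if c = '"' then [] :: splitQ l
    else
      match splitQ l with
      | [] => [[c]]   -- unreachable: splitQ is never empty
      | h :: t => (c :: h) :: t

-- join parts, emitting the token for gap index i after every part but the last
def joinAlt : List (List Char) → Nat → List Char
  | [], _ => []
  | [x], _ => x
  | x :: y :: t, i =>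
    x ++ (if i % 2 = 0 then ['`', '`'] else ['\'', '\'']) ++ joinAlt (y :: t) (i + 1)

def latex_quotes_alt (string : String) : String :=
  String.mk (joinAlt (splitQ string.toList) 0)

-- ===== PRECONDITION & SPEC =====
def Spec_latex_quotes (string : String) (out : String) : Prop := out = latex_quotes_alt string
instance (string : String) (out : String) : Decidable (Spec_latex_quotes string out) := by unfold Spec_latex_quotes; infer_instance

-- ===== CLAIM (what is proved, stated in full; the proofs are below) =====
def Claim_equal_latex_quotes : Prop := ∀ (string : String), Dom_latex_quotes string → Spec_latex_quotes string (latex_quotes string)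

-- ===== LEMMAS AND PROOFS =====

theorem splitQ_ne_nil (l : List Char) : splitQ l ≠ [] := by
  cases l with
  | nil => simp [splitQ]
  | cons c l =>
    simp only [splitQ]
    split
    · simp
    · split <;> simp

theorem joinAlt_cons_cons (c : Char) (h : List Char) (t : List (List Char)) (i : Nat) :
    joinAlt ((c :: h) :: t) i = c :: joinAlt (h :: t) i := by
  cases t <;> simp [joinAlt]

theorem loop_eq (l : List Char) (acc : List Char) (k : Nat) :
    (l.foldl latexQuotesStep (acc, k)).1 = acc ++ joinAlt (splitQ l) k := by
  induction l generalizing acc k with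
  | nil => simp [splitQ, joinAlt]
  | cons c l ih =>
    by_cases hc : c = '"'
    · subst hc
      simp only [List.foldl, latexQuotesStep, if_pos rfl, splitQ]
      rw [ih]
      rcases hne : splitQ l with _ | ⟨h, t⟩
      · exact absurd hne (splitQ_ne_nil l)
      · simp [joinAlt]
    · simp only [List.foldl, latexQuotesStep, if_neg hc, splitQ]
      rw [ih]
      rcases hne : splitQ l with _ | ⟨h, t⟩
      · exact absurd hne (splitQ_ne_nil l)
      · rw [joinAlt_cons_cons]; simp

-- ===== VERDICT (by name: the statement is the Claim_ definition above) =====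
theorem latex_quotes_spec : Claim_equal_latex_quotes := by
  intro s _
  unfold Spec_latex_quotes latex_quotes latex_quotes_alt
  rw [loop_eq]
  simp
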